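-- pv_equiv track=rewrite | github.com/TecVit/obi | neps/matematica/fatorial.py | menor_quantidade_fatoriais
-- ===== SOURCE A (Python) =====
-- def menor_quantidade_fatoriais(N):
--   fatoriais = []
--
--   f = 1
--   i = 1
--
--   while f <= N:
--     fatoriais.append(f)
--     i += 1
--     f *= i
--
--   count = 0
--   idx = len(fatoriais) - 1
--
--   while N > 0:
--     if fatoriais[idx] <= N:
--       N -= fatoriais[idx]
--       count += 1
--     else:
--       idx -= 1
--
--   return count
-- ===== SOURCE B (Python) =====
-- def menor_quantidade_fatoriais(N):
--   # digit sum of N in the factorial number system: no factorial list needed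
--   count = 0
--   i = 2
--   while N > 0:
--     N, r = divmod(N, i)
--     count += r
--     i += 1
--   return count
-- ===== Notes on version B (the rewrite author's own statement) =====
-- stated objective: simpler
-- what changed: Replaces the precomputed factorial list and top-down greedy subtraction by a bottom-up divmod loop summing the digits of N in the factorial number system.
import Mathlib
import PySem

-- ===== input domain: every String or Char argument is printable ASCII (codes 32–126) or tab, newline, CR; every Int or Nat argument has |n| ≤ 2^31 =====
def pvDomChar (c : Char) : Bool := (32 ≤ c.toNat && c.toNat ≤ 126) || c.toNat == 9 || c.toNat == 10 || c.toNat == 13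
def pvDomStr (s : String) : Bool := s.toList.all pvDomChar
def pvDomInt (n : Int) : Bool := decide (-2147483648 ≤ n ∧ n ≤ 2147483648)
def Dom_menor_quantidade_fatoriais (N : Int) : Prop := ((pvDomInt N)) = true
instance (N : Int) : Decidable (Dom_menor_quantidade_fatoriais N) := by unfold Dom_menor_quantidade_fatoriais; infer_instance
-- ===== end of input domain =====

-- B drops the factorial list and greedy subtraction and instead sums the digits of N
-- in the factorial number system by successive divmod (objective: simpler).

-- ===== PORT A =====
-- first while loop of A: build the list of factorials ≤ N (fuel is a totality guard only)
def pvBuildFacts (fuel : Nat) (N f i : Int) (acc : List Int) : List Int :=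
  match fuel with
  | 0 => acc
  | fuel + 1 =>
    if f ≤ N then pvBuildFacts fuel N (f * (i + 1)) (i + 1) (acc ++ [f]) else acc

-- second while loop of A: greedy subtraction (none from pyGet? = IndexError, unreachable)
def pvGreedyLoop (fuel : Nat) (fats : List Int) (N count idx : Int) : Int :=
  match fuel with
  | 0 => count
  | fuel + 1 =>
    if 0 < N then
      match PySem.List.pyGet? fats idx with
      | none => count
      | some v =>
        if v ≤ N then pvGreedyLoop fuel fats (N - v) (count + 1) idx
        else pvGreedyLoop fuel fats N count (idx - 1)
    else count

def menor_quantidade_fatoriais (N : Int) : Int :=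
  let fats := pvBuildFacts (N.toNat + 1) N 1 1 []
  pvGreedyLoop (N.toNat + fats.length + 1) fats N 0 ((fats.length : Int) - 1)

-- ===== PORT B =====
-- B's while loop: N, r = divmod(N, i); count += r; i += 1 (fuel is a totality guard only)
def pvAltLoop (fuel : Nat) (N i count : Int) : Int :=
  match fuel with
  | 0 => count
  | fuel + 1 =>
    if 0 < N then
      pvAltLoop fuel (PySem.Int.floordiv N i) (i + 1) (count + PySem.Int.mod N i)
    else count

def menor_quantidade_fatoriais_alt (N : Int) : Int :=
  pvAltLoop (N.toNat + 1) N 2 0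

-- ===== PRECONDITION & SPEC =====
def Spec_menor_quantidade_fatoriais (N : Int) (out : Int) : Prop := out = menor_quantidade_fatoriais_alt N
instance (N : Int) (out : Int) : Decidable (Spec_menor_quantidade_fatoriais N out) := by unfold Spec_menor_quantidade_fatoriais; infer_instance

-- ===== CLAIM (what is proved, stated in full; the proofs are below) =====
def Claim_equal_menor_quantidade_fatoriais : Prop := ∀ (N : Int), Dom_menor_quantidade_fatoriais N → Spec_menor_quantidade_fatoriais N (menor_quantidade_fatoriais N)

-- ===== LEMMAS AND PROOFS =====

-- weights of the factorial number system from position i: wfun i 0 = 1, wfun i (k+1) = wfun i k * (i+k)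
def wfun (i : Int) (k : Nat) : Int :=
  match k with
  | 0 => 1
  | k + 1 => wfun i k * (i + k)

-- factorial as Int: fact k = k! = wfun 1 k
def factI (k : Nat) : Int := wfun 1 k

-- digit sum of N in the factorial system starting at divisor i
def gAux (N i : Int) : Int :=
  if _h : 0 < N ∧ 2 ≤ i then
    PySem.Int.mod N i + gAux (PySem.Int.floordiv N i) (i + 1)
  else 0
termination_by N.toNat
decreasing_by
  have h2 : 0 < i := by omega
  have heq := PySem.Int.floordiv_eq_ediv_of_pos (a := N) h2
  have hlt : N / i < N := by
    rw [Int.ediv_lt_iff_lt_mul h2]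
    nlinarith [_h.1, _h.2]
  rw [heq]
  omega

theorem wfun_pos (i : Int) (k : Nat) (hi : 1 ≤ i) : 1 ≤ wfun i k := by
  induction k with
  | zero => simp [wfun]
  | succ k ih =>
    show 1 ≤ wfun i k * (i + k)
    have : (1:Int) ≤ i + k := by omega
    nlinarith

theorem wfun_shift (i : Int) (k : Nat) : wfun i (k + 1) = i * wfun (i + 1) k := by
  induction k with
  | zero => simp [wfun]
  | succ k ih =>
    show wfun i (k+1) * (i + (k+1)) = i * (wfun (i+1) k * ((i+1) + k))
    rw [ih]; ring

theorem factI_succ (k : Nat) : factI (k + 1) = factI k * (k + 1) := by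
  show wfun 1 k * (1 + k) = wfun 1 k * (k + 1)
  ring

theorem factI_eq_wfun2 (k : Nat) : factI (k + 1) = wfun 2 k := by
  show wfun 1 (k + 1) = wfun 2 k
  rw [wfun_shift]; norm_num

theorem factI_ge_self (k : Nat) : (k : Int) ≤ factI k := by
  induction k with
  | zero => simp [factI, wfun]
  | succ k ih =>
    rw [factI_succ]
    have h1 : 1 ≤ factI k := wfun_pos 1 k le_rfl
    have h0 : (0:Int) ≤ (k : Int) := by positivity
    push_cast
    nlinarith

theorem gAux_zero (i : Int) : gAux 0 i = 0 := by rw [gAux]; simp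

-- the key lemma: subtracting the weight wfun i k, when wfun i k ≤ N < wfun i (k+1),
-- removes exactly 1 from the digit sum
theorem gAux_sub (k : Nat) : ∀ (i N : Int), 2 ≤ i → wfun i k ≤ N → N < wfun i (k + 1) →
    gAux N i = 1 + gAux (N - wfun i k) i := by
  induction k with
  | zero =>
    intro i N hi h1 h2
    have hw1 : wfun i 1 = i := by simp [wfun]
    rw [hw1] at h2
    have hN1 : (1:Int) ≤ N := h1
    have hfd : PySem.Int.floordiv N i = N / i := PySem.Int.floordiv_eq_ediv_of_pos (by omega)
    have hmd : PySem.Int.mod N i = N % i := PySem.Int.mod_eq_emod_of_pos (by omega)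
    have hdiv : N / i = 0 := Int.ediv_eq_zero_of_lt (by omega) h2
    have hmod : N % i = N := Int.emod_eq_of_lt (by omega) h2
    rw [gAux, dif_pos (show 0 < N ∧ 2 ≤ i from ⟨by omega, hi⟩), hfd, hmd, hdiv, hmod, gAux_zero]
    show N + 0 = 1 + gAux (N - wfun i 0) i
    have hw0 : wfun i 0 = 1 := rfl
    rw [hw0]
    by_cases hN : N = 1
    · rw [hN]
      norm_num [gAux_zero]
    · rw [gAux, dif_pos (show 0 < N - 1 ∧ 2 ≤ i from ⟨by omega, hi⟩)]
      have hfd2 : PySem.Int.floordiv (N-1) i = (N-1) / i := PySem.Int.floordiv_eq_ediv_of_pos (by omega)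
      have hmd2 : PySem.Int.mod (N-1) i = (N-1) % i := PySem.Int.mod_eq_emod_of_pos (by omega)
      have hdiv2 : (N-1) / i = 0 := Int.ediv_eq_zero_of_lt (by omega) (by omega)
      have hmod2 : (N-1) % i = N - 1 := Int.emod_eq_of_lt (by omega) (by omega)
      rw [hfd2, hmd2, hdiv2, hmod2, gAux_zero]
      ring
  | succ k ih =>
    intro i N hi h1 h2
    have hv : wfun i (k + 1) = i * wfun (i + 1) k := wfun_shift i k
    have hv2 : wfun i (k + 1 + 1) = i * wfun (i + 1) (k + 1) := wfun_shift i (k + 1)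
    have hvpos : 1 ≤ wfun (i + 1) k := wfun_pos (i + 1) k (by omega)
    have hNpos : 0 < N := by
      have := wfun_pos i (k + 1) (by omega)
      omega
    have hfd : PySem.Int.floordiv N i = N / i := PySem.Int.floordiv_eq_ediv_of_pos (by omega)
    have hmd : PySem.Int.mod N i = N % i := PySem.Int.mod_eq_emod_of_pos (by omega)
    have hlow : wfun (i + 1) k ≤ N / i := by
      rw [Int.le_ediv_iff_mul_le (by omega), mul_comm, ← hv]
      exact h1
    have hhigh : N / i < wfun (i + 1) (k + 1) := by
      rw [Int.ediv_lt_iff_lt_mul (by omega), mul_comm, ← hv2]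
      exact h2
    have hIH := ih (i + 1) (N / i) (by omega) hlow hhigh
    rw [gAux, dif_pos (show 0 < N ∧ 2 ≤ i from ⟨hNpos, hi⟩), hfd, hmd, hIH, hv]
    by_cases h0 : N - i * wfun (i + 1) k = 0
    · have hdvd : N = i * wfun (i + 1) k := by linarith
      have hdiv : N / i = wfun (i + 1) k := by
        rw [hdvd]
        exact Int.mul_ediv_cancel_left _ (by omega)
      have hmod : N % i = 0 := by
        rw [hdvd]
        exact Int.mul_emod_right _ _
      rw [h0, gAux_zero, hmod, hdiv, sub_self, gAux_zero]
      ring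
    · have hsub : i * wfun (i + 1) k ≤ N := by rw [← hv]; exact h1
      have hsubpos : 0 < N - i * wfun (i + 1) k := lt_of_le_of_ne (by linarith) (Ne.symm h0)
      conv_rhs => rw [gAux]
      rw [dif_pos (show 0 < N - i * wfun (i + 1) k ∧ 2 ≤ i from ⟨hsubpos, hi⟩)]
      have hfd2 : PySem.Int.floordiv (N - i * wfun (i+1) k) i = (N - i * wfun (i+1) k) / i :=
        PySem.Int.floordiv_eq_ediv_of_pos (by omega)
      have hmd2 : PySem.Int.mod (N - i * wfun (i+1) k) i = (N - i * wfun (i+1) k) % i :=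
        PySem.Int.mod_eq_emod_of_pos (by omega)
      have hdiv2 : (N - i * wfun (i+1) k) / i = N / i - wfun (i+1) k := by
        have he : N - i * wfun (i+1) k = N + (-(wfun (i+1) k)) * i := by ring
        rw [he, Int.add_mul_ediv_right _ _ (show (i:Int) ≠ 0 by omega)]
        ring
      have hmod2 : (N - i * wfun (i+1) k) % i = N % i := by
        have he : N - i * wfun (i+1) k = N + (-(wfun (i+1) k)) * i := by ring
        rw [he, Int.add_mul_emod_self_right]
      rw [hfd2, hmd2, hdiv2, hmod2]
      ring

-- ===== B side: pvAltLoop computes gAux when fuel suffices =====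
theorem pvAltLoop_eq : ∀ (fuel : Nat) (N i count : Int), 0 ≤ N → 2 ≤ i → N.toNat < fuel →
    pvAltLoop fuel N i count = count + gAux N i := by
  intro fuel
  induction fuel with
  | zero => intro N i count _ _ h; omega
  | succ fuel ih =>
    intro N i count hN hi hfuel
    by_cases hpos : 0 < N
    · have hfd : PySem.Int.floordiv N i = N / i := PySem.Int.floordiv_eq_ediv_of_pos (by omega)
      have hlt : N / i < N := by
        rw [Int.ediv_lt_iff_lt_mul (by omega)]
        nlinarith
      have hge : 0 ≤ N / i := Int.ediv_nonneg (by omega) (by omega)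
      show (if 0 < N then pvAltLoop fuel (PySem.Int.floordiv N i) (i + 1) (count + PySem.Int.mod N i) else count) = _
      rw [if_pos hpos,
        ih (PySem.Int.floordiv N i) (i + 1) (count + PySem.Int.mod N i)
          (by rw [hfd]; exact hge) (by omega) (by rw [hfd]; omega)]
      conv_rhs => rw [gAux]
      rw [dif_pos (show 0 < N ∧ 2 ≤ i from ⟨hpos, hi⟩)]
      ring
    · have hN0 : N = 0 := by omega
      subst hN0
      show (if (0:Int) < 0 then _ else _) = _
      rw [if_neg (by omega), gAux_zero]
      ring

-- ===== A side: the factorial list built by the first loop =====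
theorem pvBuildFacts_shape (N : Int) : ∀ (fuel j : Nat) (acc : List Int), 1 ≤ j →
    N.toNat + 2 ≤ fuel + j →
    ∃ m : Nat, j - 1 ≤ m ∧
      pvBuildFacts fuel N (factI j) (j : Int) acc = acc ++ (List.range' j (m + 1 - j)).map factI ∧
      N < factI (m + 1) ∧ (j ≤ m → factI m ≤ N) := by
  intro fuel
  induction fuel with
  | zero =>
    intro j acc hj hfuel
    -- fuel 0 forces factI j > N (else j ≤ N.toNat, contradiction with bound)
    refine ⟨j - 1, le_rfl, ?_, ?_, by omega⟩
    · simp [pvBuildFacts, Nat.sub_add_cancel hj]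
    · have : factI (j - 1 + 1) = factI j := by congr 1; omega
      rw [this]
      by_contra hle
      have h1 : (j : Int) ≤ factI j := factI_ge_self j
      have : (j : Int) ≤ N := by omega
      omega
  | succ fuel ih =>
    intro j acc hj hfuel
    by_cases hle : factI j ≤ N
    · show ∃ m, _ ∧ (if factI j ≤ N then pvBuildFacts fuel N (factI j * ((j:Int) + 1)) ((j:Int) + 1) (acc ++ [factI j]) else acc) = _ ∧ _
      rw [if_pos hle]
      have hstep : factI j * ((j : Int) + 1) = factI (j + 1) := by rw [factI_succ]
      have hcast : ((j : Int) + 1) = ((j + 1 : Nat) : Int) := by push_cast; ring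
      rw [hstep, hcast]
      obtain ⟨m, hm1, hm2, hm3, hm4⟩ := ih (j + 1) (acc ++ [factI j]) (by omega) (by omega)
      refine ⟨m, by omega, ?_, hm3, fun _ => ?_⟩
      · rw [hm2, List.append_assoc]
        congr 1
        have hjm : j ≤ m := by omega
        have : m + 1 - j = (m + 1 - (j + 1)) + 1 := by omega
        rw [this, List.range'_succ]
        simp
      · rcases Nat.lt_or_ge j m with h | h
        · exact hm4 (by omega)
        · have : m = j := by omega
          rw [this]; exact hle
    · refine ⟨j - 1, le_rfl, ?_, ?_, by omega⟩
      · show (if factI j ≤ N then _ else acc) = _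
        rw [if_neg hle]
        simp [Nat.sub_add_cancel hj]
      · have : factI (j - 1 + 1) = factI j := by congr 1; omega
        rw [this]; omega

-- element of the factorial list at index p
theorem factList_get (m p : Nat) (hp : p < m) :
    PySem.List.pyGet? ((List.range' 1 m).map factI) (p : Int) = some (factI (p + 1)) := by
  rw [PySem.List.pyGet?_natCast]
  rw [List.getElem?_eq_getElem (by simpa using hp)]
  simp [List.getElem_range']
  congr 1
  omega

-- the greedy loop computes gAux · 2 under the invariant N < factI (p+2)
theorem pvGreedyLoop_eq (m : Nat) : ∀ (fuel : Nat) (N count : Int) (p : Nat), p < m →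
    0 < N → N < factI (p + 2) → N.toNat + p < fuel →
    pvGreedyLoop fuel ((List.range' 1 m).map factI) N count (p : Int) = count + gAux N 2 := by
  intro fuel
  induction fuel with
  | zero => intro N count p _ hN _ h; omega
  | succ fuel ih =>
    intro N count p hpm hN hinv hfuel
    show (if 0 < N then _ else _) = _
    rw [if_pos hN, factList_get m p hpm]
    show (if factI (p+1) ≤ N then pvGreedyLoop fuel _ (N - factI (p+1)) (count+1) (p : Int)
          else pvGreedyLoop fuel _ N count ((p : Int) - 1)) = _
    have hfp1 : 1 ≤ factI (p + 1) := wfun_pos 1 (p + 1) le_rfl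
    by_cases hle : factI (p + 1) ≤ N
    · rw [if_pos hle]
      have hkey : gAux N 2 = 1 + gAux (N - factI (p + 1)) 2 := by
        have h1 : wfun 2 p ≤ N := by rw [← factI_eq_wfun2]; exact hle
        have h2 : N < wfun 2 (p + 1) := by rw [← factI_eq_wfun2]; exact hinv
        rw [gAux_sub p 2 N le_rfl h1 h2, factI_eq_wfun2]
      set N' := N - factI (p + 1) with hN'
      by_cases hN'0 : N' = 0
      · -- next iteration exits immediately
        have hfuel1 : 1 ≤ fuel := by omega
        obtain ⟨fuel', rfl⟩ : ∃ f', fuel = f' + 1 := ⟨fuel - 1, by omega⟩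
        show (if 0 < N' then _ else count + 1) = _
        rw [if_neg (by omega), hkey, hN'0, gAux_zero]; ring
      · have hN'pos : 0 < N' := by
          have : 0 ≤ N' := by omega
          omega
        have hN'inv : N' < factI (p + 2) := by omega
        have hN'fuel : N'.toNat + p < fuel := by omega
        rw [ih N' (count + 1) p hpm hN'pos hN'inv hN'fuel, hkey]; ring
    · rw [if_neg hle]
      -- p = 0 impossible: factI 1 = 1 ≤ N
      have hp0 : 1 ≤ p := by
        by_contra h
        have : p = 0 := by omega
        subst this
        have h00 : factI (0 + 1) = 1 := by decide
        omega
      have hcast : (p : Int) - 1 = ((p - 1 : Nat) : Int) := by omega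
      rw [hcast]
      have : factI ((p - 1) + 2) = factI (p + 1) := by congr 1; omega
      exact ih N count (p - 1) (by omega) hN (by omega) (by omega)

-- ===== VERDICT (by name: the statement is the Claim_ definition above) =====
theorem menor_quantidade_fatoriais_spec : Claim_equal_menor_quantidade_fatoriais := by
  intro N _
  show menor_quantidade_fatoriais N = menor_quantidade_fatoriais_alt N
  unfold menor_quantidade_fatoriais menor_quantidade_fatoriais_alt
  by_cases hN : 0 < N
  · -- build the factorial list
    have hfact1 : factI 1 = 1 := by decide
    have hbuild := pvBuildFacts_shape N (N.toNat + 1) 1 [] le_rfl (by omega)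
    rw [hfact1] at hbuild
    obtain ⟨m, _, hb, hlt, hle⟩ := hbuild
    have hm1 : 1 ≤ m := by
      by_contra h
      have hm0 : m = 0 := by omega
      subst hm0
      rw [hfact1] at hlt; omega
    show pvGreedyLoop _ (pvBuildFacts (N.toNat + 1) N 1 1 []) N 0 _ = _
    have hb' : pvBuildFacts (N.toNat + 1) N 1 (1 : Int) [] = (List.range' 1 m).map factI := by
      have h11 : ((1 : Nat) : Int) = (1 : Int) := by norm_num
      rw [h11] at hb
      simpa using hb
    rw [hb']
    have hlen : ((List.range' 1 m).map factI).length = m := by simp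
    rw [hlen]
    have hcast : (m : Int) - 1 = ((m - 1 : Nat) : Int) := by omega
    rw [hcast]
    have hinv : N < factI ((m - 1) + 2) := by
      have : (m - 1) + 2 = m + 1 := by omega
      rw [this]; exact hlt
    rw [pvGreedyLoop_eq m (N.toNat + m + 1) N 0 (m - 1) (by omega) hN hinv (by omega)]
    rw [pvAltLoop_eq (N.toNat + 1) N 2 0 (by omega) le_rfl (by omega)]
  · -- N ≤ 0: both loops exit immediately
    simp [pvGreedyLoop, pvAltLoop, hN]
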